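-- pv_equiv track=rewrite | github.com/alexlitz/cllm_temp | old/c4_relocate.py | pack_and_relocate
-- ===== SOURCE A (Python) =====
-- def pack_and_relocate(raw_bytecode, text_base, target_base=0, data_base=None, data_size=0, target_data_base=0x10000):
--     """
--     Pack raw bytecode and relocate addresses.
--
--     xc layout: one value per 8-byte word
--     Our layout: opcode+immediate packed into one 8-byte word
--
--     NOTE: xc_dump2 outputs bytecode starting from old_text+1, skipping word 0.
--     So raw[0] = old_text[1], raw[i] = old_text[i+1].
--     When xc generates a branch to absolute address A, the word index is (A - text_base) / 8.
--     But our raw array is offset by 1, so we need to subtract 1 to get raw index.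
--
--     Returns: (packed_bytecode, raw_word_to_our_byte_map)
--     """
--     OPS_WITH_IMM = {0, 1, 2, 3, 4, 5, 6, 7}  # LEA, IMM, JMP, JSR, JZ, JNZ, ENT, ADJ
--
--     # First pass: build mapping from xc word index to our byte offset
--     # Note: xc word N corresponds to raw[N-1] because dump skips word 0
--     xc_word_to_our_byte = {}
--     packed = []
--     i = 0
--
--     text_size = len(raw_bytecode) * 8
--
--     while i < len(raw_bytecode):
--         # raw[i] corresponds to xc word (i+1) because dump starts at old_text+1
--         xc_word = i + 1
--         xc_word_to_our_byte[xc_word] = len(packed) * 8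
--
--         op = raw_bytecode[i]
--
--         if op in OPS_WITH_IMM and i + 1 < len(raw_bytecode):
--             imm = raw_bytecode[i + 1]
--             xc_word_to_our_byte[xc_word + 1] = len(packed) * 8  # imm is part of same word
--
--             # Check if this immediate is a text address that needs relocation
--             if text_base <= imm < text_base + text_size + 0x10000:
--                 # Convert absolute address to xc word index
--                 xc_byte_offset = imm - text_base
--                 xc_word_index = xc_byte_offset // 8
--                 # Mark as text relocation (xc_word_index is the actual xc word)
--                 packed.append((op, xc_word_index, 'text'))
--             # Check if this immediate is a data address that needs relocation
--             elif data_base is not None and data_base <= imm < data_base + data_size + 0x10000: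
--                 # Data address - will relocate to our data segment
--                 data_offset = imm - data_base
--                 packed.append((op, data_offset, 'data'))
--             else:
--                 packed.append((op, imm, False))
--             i += 2
--         else:
--             packed.append((op, None, False))
--             i += 1
--
--     # Second pass: resolve addresses
--     final_packed = []
--     for item in packed:
--         if len(item) == 3:
--             op, val, reloc_type = item
--             if reloc_type == 'text':
--                 # Convert xc word index to our byte offset in text segment
--                 our_byte = xc_word_to_our_byte.get(val, val * 8)
--                 final_packed.append(op | ((target_base + our_byte) << 8))
--             elif reloc_type == 'data':
--                 # Data address - relocate to our data segment
--                 final_packed.append(op | ((target_data_base + val) << 8))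
--             elif val is not None:
--                 # Pack immediate as signed 64-bit value
--                 # The immediate occupies bits 8-63 (56 bits)
--                 final_packed.append(op | (val << 8))
--             else:
--                 final_packed.append(op)
--         else:
--             final_packed.append(item)
--
--     return final_packed, xc_word_to_our_byte
-- ===== SOURCE B (Python) =====
-- def pack_and_relocate(raw_bytecode, text_base, target_base=0, data_base=None, data_size=0, target_data_base=0x10000):
--     OPS_WITH_IMM = {0, 1, 2, 3, 4, 5, 6, 7}
--     n = len(raw_bytecode)
--     text_size = n * 8
--
--     # Pass 1: only the xc-word -> our-byte map (one output word per packed entry).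
--     xc_word_to_our_byte = {}
--     i = 0
--     out_words = 0
--     while i < n:
--         xc_word_to_our_byte[i + 1] = out_words * 8
--         if raw_bytecode[i] in OPS_WITH_IMM and i + 1 < n:
--             xc_word_to_our_byte[i + 2] = out_words * 8
--             i += 2
--         else:
--             i += 1
--         out_words += 1
--
--     # Pass 2: re-scan and emit final integers directly, no intermediate tuple list.
--     final_packed = []
--     i = 0
--     while i < n:
--         op = raw_bytecode[i]
--         if op in OPS_WITH_IMM and i + 1 < n:
--             imm = raw_bytecode[i + 1]
--             if text_base <= imm < text_base + text_size + 0x10000: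
--                 w = (imm - text_base) // 8
--                 final_packed.append(op | ((target_base + xc_word_to_our_byte.get(w, w * 8)) << 8))
--             elif data_base is not None and data_base <= imm < data_base + data_size + 0x10000:
--                 final_packed.append(op | ((target_data_base + (imm - data_base)) << 8))
--             else:
--                 final_packed.append(op | (imm << 8))
--             i += 2
--         else:
--             final_packed.append(op)
--             i += 1
--     return final_packed, xc_word_to_our_byte
-- ===== Notes on version B (the rewrite author's own statement) =====
-- stated objective: simpler
-- what changed: B drops A's intermediate tagged-tuple list entirely: one loop builds only the word-to-byte map, a second loop re-scans the raw bytecode and emits each final packed integer directly.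
import Mathlib
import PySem

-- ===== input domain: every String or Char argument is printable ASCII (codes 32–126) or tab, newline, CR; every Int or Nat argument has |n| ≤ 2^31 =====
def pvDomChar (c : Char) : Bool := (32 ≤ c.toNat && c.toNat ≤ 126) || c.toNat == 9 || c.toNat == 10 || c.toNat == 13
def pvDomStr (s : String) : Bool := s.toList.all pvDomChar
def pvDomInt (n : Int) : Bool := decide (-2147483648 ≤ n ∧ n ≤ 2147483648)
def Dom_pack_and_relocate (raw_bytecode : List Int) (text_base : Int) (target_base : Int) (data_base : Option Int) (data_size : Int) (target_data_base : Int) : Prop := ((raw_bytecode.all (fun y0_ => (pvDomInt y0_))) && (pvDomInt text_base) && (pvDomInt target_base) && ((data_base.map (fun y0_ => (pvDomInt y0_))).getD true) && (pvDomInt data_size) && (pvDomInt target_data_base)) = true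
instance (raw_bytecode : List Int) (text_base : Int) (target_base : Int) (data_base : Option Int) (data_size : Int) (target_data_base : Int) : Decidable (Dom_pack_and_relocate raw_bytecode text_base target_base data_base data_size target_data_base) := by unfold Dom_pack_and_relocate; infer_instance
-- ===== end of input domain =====

-- B replaces A's two-pass build of a tagged intermediate tuple list by a map-only first pass
-- plus a second re-scan emitting the final integers directly (objective: simpler).

-- ===== PORT A =====
-- A's intermediate tuples (op, val, reloc_type) take the reachable shapes
-- ('text', v) / ('data', v) / (False, imm) / (False, None); encoded as one inductive.
inductive PvEntry
  | etext (op v : Int)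
  | edata (op v : Int)
  | eimm (op v : Int)
  | enone (op : Int)
deriving DecidableEq, Repr

-- A's first while-loop: builds xc_word_to_our_byte and the intermediate `packed` list.
def pvALoop1 (text_base text_size : Int) (data_base : Option Int) (data_size : Int)
    (rest : List Int) (m : PySem.Dict Int Int) (packed : List PvEntry) (xcWord : Int) :
    PySem.Dict Int Int × List PvEntry :=
  match rest with
  | [] => (m, packed)
  | op :: rest' =>
    let m1 := m.insert xcWord ((packed.length : Int) * 8)
    match rest' with
    | imm :: rest'' =>
      if op ∈ ([0, 1, 2, 3, 4, 5, 6, 7] : List Int) then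
        let m2 := m1.insert (xcWord + 1) ((packed.length : Int) * 8)
        let entry :=
          if text_base ≤ imm ∧ imm < text_base + text_size + 0x10000 then
            PvEntry.etext op (PySem.Int.floordiv (imm - text_base) 8)
          else
            match data_base with
            | some db =>
              if db ≤ imm ∧ imm < db + data_size + 0x10000 then PvEntry.edata op (imm - db)
              else PvEntry.eimm op imm
            | none => PvEntry.eimm op imm
        pvALoop1 text_base text_size data_base data_size rest'' m2 (packed ++ [entry]) (xcWord + 2)
      else
        pvALoop1 text_base text_size data_base data_size (imm :: rest'') m1
          (packed ++ [PvEntry.enone op]) (xcWord + 1)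
    | [] =>
      pvALoop1 text_base text_size data_base data_size [] m1
        (packed ++ [PvEntry.enone op]) (xcWord + 1)
  termination_by rest.length
  decreasing_by all_goals (simp; try omega)

-- A's second pass: resolve one intermediate item.
def pvAResolve (target_base target_data_base : Int) (m : PySem.Dict Int Int) (item : PvEntry) : Int :=
  match item with
  | .etext op v => PySem.Int.bor op ((target_base + m.getD v (v * 8)) <<< (8 : Nat))
  | .edata op v => PySem.Int.bor op ((target_data_base + v) <<< (8 : Nat))
  | .eimm op v => PySem.Int.bor op (v <<< (8 : Nat))
  | .enone op => op

def pack_and_relocate (raw_bytecode : List Int) (text_base : Int) (target_base : Int) (data_base : Option Int) (data_size : Int) (target_data_base : Int) : List Int × (List (Int × Int)) :=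
  let text_size : Int := (raw_bytecode.length : Int) * 8
  let r := pvALoop1 text_base text_size data_base data_size raw_bytecode PySem.Dict.empty [] 1
  (r.2.map (pvAResolve target_base target_data_base r.1), r.1.items)

-- ===== PORT B =====
-- B's first loop: only the xc-word -> our-byte map, counting output words.
def pvBPass1 (rest : List Int) (m : PySem.Dict Int Int) (xcWord : Int) (outWords : Int) :
    PySem.Dict Int Int :=
  match rest with
  | [] => m
  | op :: rest' =>
    let m1 := m.insert xcWord (outWords * 8)
    match rest' with
    | _imm :: rest'' =>
      if op ∈ ([0, 1, 2, 3, 4, 5, 6, 7] : List Int) then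
        pvBPass1 rest'' (m1.insert (xcWord + 1) (outWords * 8)) (xcWord + 2) (outWords + 1)
      else
        pvBPass1 (_imm :: rest'') m1 (xcWord + 1) (outWords + 1)
    | [] => m1
  termination_by rest.length
  decreasing_by all_goals (simp; try omega)

-- B's second loop: emit final integers directly from the raw bytecode and the finished map.
def pvBPass2 (text_base text_size : Int) (data_base : Option Int) (data_size : Int)
    (target_base target_data_base : Int) (m : PySem.Dict Int Int) (rest : List Int) : List Int :=
  match rest with
  | [] => []
  | op :: rest' =>
    match rest' with
    | imm :: rest'' =>
      if op ∈ ([0, 1, 2, 3, 4, 5, 6, 7] : List Int) then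
        let x :=
          if text_base ≤ imm ∧ imm < text_base + text_size + 0x10000 then
            let w := PySem.Int.floordiv (imm - text_base) 8
            PySem.Int.bor op ((target_base + m.getD w (w * 8)) <<< (8 : Nat))
          else
            match data_base with
            | some db =>
              if db ≤ imm ∧ imm < db + data_size + 0x10000 then
                PySem.Int.bor op ((target_data_base + (imm - db)) <<< (8 : Nat))
              else PySem.Int.bor op (imm <<< (8 : Nat))
            | none => PySem.Int.bor op (imm <<< (8 : Nat))
        x :: pvBPass2 text_base text_size data_base data_size target_base target_data_base m rest''
      else
        op :: pvBPass2 text_base text_size data_base data_size target_base target_data_base m (imm :: rest'')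
    | [] => [op]
  termination_by rest.length
  decreasing_by all_goals (simp; try omega)

def pack_and_relocate_alt (raw_bytecode : List Int) (text_base : Int) (target_base : Int) (data_base : Option Int) (data_size : Int) (target_data_base : Int) : List Int × (List (Int × Int)) :=
  let text_size : Int := (raw_bytecode.length : Int) * 8
  let m := pvBPass1 raw_bytecode PySem.Dict.empty 1 0
  (pvBPass2 text_base text_size data_base data_size target_base target_data_base m raw_bytecode, m.items)

-- ===== PRECONDITION & SPEC =====
def Spec_pack_and_relocate (raw_bytecode : List Int) (text_base : Int) (target_base : Int) (data_base : Option Int) (data_size : Int) (target_data_base : Int) (out : List Int × (List (Int × Int))) : Prop := out = pack_and_relocate_alt raw_bytecode text_base target_base data_base data_size target_data_base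
instance (raw_bytecode : List Int) (text_base : Int) (target_base : Int) (data_base : Option Int) (data_size : Int) (target_data_base : Int) (out : List Int × (List (Int × Int))) : Decidable (Spec_pack_and_relocate raw_bytecode text_base target_base data_base data_size target_data_base out) := by unfold Spec_pack_and_relocate; infer_instance

-- ===== CLAIM (what is proved, stated in full; the proofs are below) =====
def Claim_equal_pack_and_relocate : Prop := ∀ (raw_bytecode : List Int) (text_base : Int) (target_base : Int) (data_base : Option Int) (data_size : Int) (target_data_base : Int), Dom_pack_and_relocate raw_bytecode text_base target_base data_base data_size target_data_base → Spec_pack_and_relocate raw_bytecode text_base target_base data_base data_size target_data_base (pack_and_relocate raw_bytecode text_base target_base data_base data_size target_data_base)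

-- ===== LEMMAS AND PROOFS =====

-- The entries A's first loop appends, as a pure function of the remaining input and word index.
def pvEntries (text_base text_size : Int) (data_base : Option Int) (data_size : Int)
    (rest : List Int) : List PvEntry :=
  match rest with
  | [] => []
  | op :: rest' =>
    match rest' with
    | imm :: rest'' =>
      if op ∈ ([0, 1, 2, 3, 4, 5, 6, 7] : List Int) then
        (if text_base ≤ imm ∧ imm < text_base + text_size + 0x10000 then
            PvEntry.etext op (PySem.Int.floordiv (imm - text_base) 8)
          else
            match data_base with
            | some db =>
              if db ≤ imm ∧ imm < db + data_size + 0x10000 then PvEntry.edata op (imm - db)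
              else PvEntry.eimm op imm
            | none => PvEntry.eimm op imm)
          :: pvEntries text_base text_size data_base data_size rest''
      else
        PvEntry.enone op :: pvEntries text_base text_size data_base data_size (imm :: rest'')
    | [] => [PvEntry.enone op]
  termination_by rest.length
  decreasing_by all_goals (simp; try omega)

theorem pvALoop1_fst (text_base text_size : Int) (data_base : Option Int) (data_size : Int)
    (rest : List Int) (m : PySem.Dict Int Int) (packed : List PvEntry) (xcWord : Int) :
    (pvALoop1 text_base text_size data_base data_size rest m packed xcWord).1 =
      pvBPass1 rest m xcWord (packed.length : Int) := by
  fun_induction pvALoop1 text_base text_size data_base data_size rest m packed xcWord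
  · rw [pvBPass1]
  · rename_i ih
    rw [ih]
    conv_rhs => rw [pvBPass1]
    simp_all
    rfl
  · rename_i ih
    rw [ih]
    conv_rhs => rw [pvBPass1]
    simp_all
    rfl
  · rename_i ih
    rw [ih]
    conv_rhs => rw [pvBPass1]
    rw [pvBPass1]
theorem pvALoop1_snd (text_base text_size : Int) (data_base : Option Int) (data_size : Int)
    (rest : List Int) (m : PySem.Dict Int Int) (packed : List PvEntry) (xcWord : Int) :
    (pvALoop1 text_base text_size data_base data_size rest m packed xcWord).2 =
      packed ++ pvEntries text_base text_size data_base data_size rest := by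
  fun_induction pvALoop1 text_base text_size data_base data_size rest m packed xcWord
  · simp [pvEntries]
  · rename_i hmem m2 entry ih
    rw [ih]
    conv_rhs => rw [pvEntries.eq_def]
    simp only [entry]
    simp [hmem]
  · rename_i hop ih
    rw [ih]
    conv_rhs => rw [pvEntries.eq_def]
    simp_all
  · rename_i ih
    rw [ih]
    conv_rhs => rw [pvEntries.eq_def]
    simp [pvEntries]

theorem pvEntries_map_resolve (text_base text_size : Int) (data_base : Option Int)
    (data_size target_base target_data_base : Int) (m : PySem.Dict Int Int) (rest : List Int) :
    (pvEntries text_base text_size data_base data_size rest).map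
        (pvAResolve target_base target_data_base m) =
      pvBPass2 text_base text_size data_base data_size target_base target_data_base m rest := by
  fun_induction pvEntries text_base text_size data_base data_size rest
  · simp [pvBPass2]
  · rename_i hop ih
    conv_rhs => rw [pvBPass2.eq_def]
    simp only [hop, if_true, List.map_cons, ih]
    split_ifs with h1
    · simp [pvAResolve]
    · cases data_base with
      | none => simp [pvAResolve]
      | some db => dsimp only; split_ifs <;> simp [pvAResolve]
  · rename_i hop ih
    conv_rhs => rw [pvBPass2.eq_def]
    simp [hop, ih, pvAResolve]
  · conv_rhs => rw [pvBPass2.eq_def]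
    simp [pvAResolve]

-- ===== VERDICT (by name: the statement is the Claim_ definition above) =====
theorem pack_and_relocate_spec : Claim_equal_pack_and_relocate := by
  intro raw tb tgb db ds tdb _
  unfold Spec_pack_and_relocate pack_and_relocate pack_and_relocate_alt
  have h1 := pvALoop1_fst tb ((raw.length : Int) * 8) db ds raw PySem.Dict.empty [] 1
  have h2 := pvALoop1_snd tb ((raw.length : Int) * 8) db ds raw PySem.Dict.empty [] 1
  simp only [List.length_nil, Int.natCast_zero] at h1
  simp only [List.nil_append] at h2
  simp only [h1, h2, pvEntries_map_resolve]
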